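-- pv_equiv track=rewrite | github.com/JaneliaSciComp/tensorswitch | src/tensorswitch_v2/writers/zarr2.py | _reorder_axes_for_ome
-- ===== SOURCE A (Python) =====
-- from typing import Dict, Optional, Tuple, List, Any
--
-- def _reorder_axes_for_ome(
--
--     axes: List[str],
--     shape: List[int],
--     chunk_shape: Optional[Tuple[int, ...]],
--     shard_shape: Optional[Tuple[int, ...]]
-- ) -> Tuple[List[str], List[int], Optional[List[int]], Optional[List[int]], Optional[Tuple[int, ...]]]:
--     """
--     Reorder axes so non-spatial dimensions come before spatial dimensions.
--
--     For precomputed format which stores as XYZC, this converts to CXYZ.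
--     Preserves the relative order within spatial and non-spatial groups.
--
--     Args:
--         axes: Original axis names (e.g., ['x', 'y', 'z', 'channel'])
--         shape: Original shape
--         chunk_shape: Original chunk shape
--         shard_shape: Original shard shape (ignored for Zarr2)
--
--     Returns:
--         (reordered_axes, reordered_shape, reordered_chunk, reordered_shard, transpose_order)
--     """
--     # Identify spatial and non-spatial axes
--     SPATIAL_AXES = {'x', 'y', 'z'}
--
--     axes_lower = [a.lower() for a in axes]
--
--     # Separate into non-spatial (first) and spatial (second), preserving order
--     non_spatial_indices = []
--     spatial_indices = []
--
--     for i, axis in enumerate(axes_lower):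
--         if axis in SPATIAL_AXES:
--             spatial_indices.append(i)
--         else:
--             non_spatial_indices.append(i)
--
--     # New order: non-spatial first, then spatial
--     new_order = non_spatial_indices + spatial_indices
--
--     # Check if reordering is needed
--     if new_order == list(range(len(axes))):
--         # Already in correct order - but still need to pad chunks if needed
--         padded_chunk = None
--         if chunk_shape:
--             padded_chunk = list(chunk_shape)
--             while len(padded_chunk) < len(axes):
--                 padded_chunk.append(1)
--         return axes, shape, padded_chunk, None, None
--
--     # Reorder axes
--     reordered_axes = [axes[i] for i in new_order]
--     reordered_shape = [shape[i] for i in new_order]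
--
--     # Reorder chunk shape if provided (pad with 1s if needed for non-spatial dims)
--     reordered_chunk = None
--     if chunk_shape:
--         # Pad chunk_shape if it's shorter than axes (e.g., 3D chunks for 4D data)
--         padded_chunk = list(chunk_shape)
--         while len(padded_chunk) < len(axes):
--             padded_chunk.append(1)  # Non-spatial dims get chunk=1
--         reordered_chunk = [padded_chunk[i] for i in new_order]
--
--     # Store transpose order for data transformation
--     transpose_order = tuple(new_order)
--
--     return reordered_axes, reordered_shape, reordered_chunk, None, transpose_order
-- ===== SOURCE B (Python) =====
-- def _reorder_axes_for_ome(axes, shape, chunk_shape, shard_shape):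
--     SPATIAL_AXES = {'x', 'y', 'z'}
--     n = len(axes)
--     # Stable sort of the index range: non-spatial axes (key False) before spatial (key True),
--     # relative order inside each group preserved by sort stability.
--     new_order = sorted(range(n), key=lambda i: axes[i].lower() in SPATIAL_AXES)
--     padded = None
--     if chunk_shape:
--         padded = list(chunk_shape) + [1] * (n - len(chunk_shape))
--     if new_order == list(range(n)):
--         return axes, shape, padded, None, None
--     take = lambda xs: [xs[i] for i in new_order]
--     return (take(axes), take(shape),
--             take(padded) if padded is not None else None,
--             None, tuple(new_order))
-- ===== Notes on version B (the rewrite author's own statement) =====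
-- stated objective: idiomatic
-- what changed: The new axis order is computed by one stable sort of range(n) on the boolean key 'is spatial' instead of A's two-accumulator partition loop, padding is done once by list concatenation instead of a while-append loop in two places, and the reorder-path comprehensions collapse into one shared permutation helper.
import Mathlib
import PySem

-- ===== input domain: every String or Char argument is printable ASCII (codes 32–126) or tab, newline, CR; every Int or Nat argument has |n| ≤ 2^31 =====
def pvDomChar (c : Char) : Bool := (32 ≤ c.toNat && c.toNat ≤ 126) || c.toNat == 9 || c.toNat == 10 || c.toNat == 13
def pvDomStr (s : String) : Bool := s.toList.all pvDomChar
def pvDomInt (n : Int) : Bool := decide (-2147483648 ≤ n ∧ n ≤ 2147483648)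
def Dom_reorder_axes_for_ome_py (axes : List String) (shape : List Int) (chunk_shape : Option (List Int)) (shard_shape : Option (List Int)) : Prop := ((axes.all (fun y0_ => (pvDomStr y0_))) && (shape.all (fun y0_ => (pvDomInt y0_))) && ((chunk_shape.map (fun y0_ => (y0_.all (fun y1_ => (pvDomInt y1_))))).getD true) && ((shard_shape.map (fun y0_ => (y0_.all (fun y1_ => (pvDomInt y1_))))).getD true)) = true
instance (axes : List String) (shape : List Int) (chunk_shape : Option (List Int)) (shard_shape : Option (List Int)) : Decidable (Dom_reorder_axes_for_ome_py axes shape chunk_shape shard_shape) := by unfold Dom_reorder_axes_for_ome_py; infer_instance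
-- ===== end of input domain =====

-- B reorders axes by one stable sort of the index range on a boolean "is spatial" key
-- instead of A's two-list partition loop; same return value, no speed claim.

-- ===== PORT A =====
-- `axis in {'x','y','z'}` ported as membership in the three-element list (exact for string sets)
def pvSpatialA (a : String) : Bool := ["x", "y", "z"].contains a

-- the `while len(padded_chunk) < len(axes): padded_chunk.append(1)` loop of A, step for step
def pvPadWhileA (c : List Int) (n : Nat) : List Int :=
  if c.length < n then pvPadWhileA (c ++ [1]) n else c
termination_by n - c.length

def reorder_axes_for_ome_py (axes : List String) (shape : List Int) (chunk_shape : Option (List Int)) (shard_shape : Option (List Int)) : List String × List Int × Option (List Int) × Option (List Int) × Option (List Int) :=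
  let axes_lower := axes.map PySem.Str.lower
  let p := (PySem.List.enumerate axes_lower 0).foldl
    (fun (acc : List Int × List Int) ia =>
      if pvSpatialA ia.2 then (acc.1, acc.2 ++ [ia.1]) else (acc.1 ++ [ia.1], acc.2))
    ([], [])
  let new_order := p.1 ++ p.2
  if new_order = PySem.List.pyRange 0 (axes.length : Int) 1 then
    -- identity path: pad chunk if truthy, shard and transpose order are None
    let padded_chunk : Option (List Int) :=
      match chunk_shape with
      | none => none
      | some c => if c.isEmpty then none else some (pvPadWhileA c axes.length)
    (axes, shape, padded_chunk, none, none)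
  else
    let reordered_axes := new_order.map (fun i => PySem.List.pyGetD axes i "")
    let reordered_shape := new_order.map (fun i => PySem.List.pyGetD shape i 0)
    let reordered_chunk : Option (List Int) :=
      match chunk_shape with
      | none => none
      | some c =>
        if c.isEmpty then none
        else some (new_order.map (fun i => PySem.List.pyGetD (pvPadWhileA c axes.length) i 0))
    (reordered_axes, reordered_shape, reordered_chunk, none, some new_order)

-- ===== PORT B =====
-- sort key of B: `axes[i].lower() in SPATIAL_AXES`
def pvKeyB (axes : List String) (i : Int) : Bool :=
  ["x", "y", "z"].contains (PySem.Str.lower (PySem.List.pyGetD axes i ""))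

-- B's `take = lambda xs: [xs[i] for i in new_order]`
def pvTakeB {A : Type} (new_order : List Int) (xs : List A) (d : A) : List A :=
  new_order.map (fun i => PySem.List.pyGetD xs i d)

def reorder_axes_for_ome_py_alt (axes : List String) (shape : List Int) (chunk_shape : Option (List Int)) (shard_shape : Option (List Int)) : List String × List Int × Option (List Int) × Option (List Int) × Option (List Int) :=
  let n := axes.length
  let new_order := PySem.List.sorted (PySem.List.pyRange 0 (n : Int) 1) (pvKeyB axes) false
  let padded : Option (List Int) :=
    match chunk_shape with
    | none => none
    | some c => if c.isEmpty then none else some (c ++ List.replicate (n - c.length) 1)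
  if new_order = PySem.List.pyRange 0 (n : Int) 1 then
    (axes, shape, padded, none, none)
  else
    (pvTakeB new_order axes "", pvTakeB new_order shape 0,
     (match padded with | none => none | some p => some (pvTakeB new_order p 0)),
     none, some new_order)

-- ===== PRECONDITION & SPEC =====
-- Pre_ excludes exactly the inputs where Python A raises IndexError (shape shorter than axes
-- while a reorder is needed, i.e. some spatial axis precedes a non-spatial one); B raises there too.
def Pre_reorder_axes_for_ome_py (axes : List String) (shape : List Int) (chunk_shape : Option (List Int)) (shard_shape : Option (List Int)) : Prop :=
  (axes.map (fun a => ["x", "y", "z"].contains (PySem.Str.lower a))).Pairwise (fun a b => a = true → b = true)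
  ∨ axes.length ≤ shape.length
instance (axes : List String) (shape : List Int) (chunk_shape : Option (List Int)) (shard_shape : Option (List Int)) : Decidable (Pre_reorder_axes_for_ome_py axes shape chunk_shape shard_shape) := by unfold Pre_reorder_axes_for_ome_py; infer_instance

def pvWitness_reorder_axes_for_ome_py : List String × List Int × Option (List Int) × Option (List Int) :=
  (["x", "c"], [4, 5], some [2], none)

def Spec_reorder_axes_for_ome_py (axes : List String) (shape : List Int) (chunk_shape : Option (List Int)) (shard_shape : Option (List Int)) (out : List String × List Int × Option (List Int) × Option (List Int) × Option (List Int)) : Prop := out = reorder_axes_for_ome_py_alt axes shape chunk_shape shard_shape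
instance (axes : List String) (shape : List Int) (chunk_shape : Option (List Int)) (shard_shape : Option (List Int)) (out : List String × List Int × Option (List Int) × Option (List Int) × Option (List Int)) : Decidable (Spec_reorder_axes_for_ome_py axes shape chunk_shape shard_shape out) := by unfold Spec_reorder_axes_for_ome_py; infer_instance

-- ===== CLAIM (what is proved, stated in full; the proofs are below) =====
def Claim_equal_reorder_axes_for_ome_py : Prop := ∀ (axes : List String) (shape : List Int) (chunk_shape : Option (List Int)) (shard_shape : Option (List Int)), Dom_reorder_axes_for_ome_py axes shape chunk_shape shard_shape → Pre_reorder_axes_for_ome_py axes shape chunk_shape shard_shape → Spec_reorder_axes_for_ome_py axes shape chunk_shape shard_shape (reorder_axes_for_ome_py axes shape chunk_shape shard_shape)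

-- ===== LEMMAS AND PROOFS =====
lemma pv_insertBy_false {α : Type} (key : α → Bool) (x : α) (hx : key x = false) :
    ∀ (F T : List α), (∀ y ∈ F, key y = false) → (∀ y ∈ T, key y = true) →
    PySem.List.insertBy (fun a b => decide (key a < key b)) x (F ++ T) = F ++ x :: T := by
  intro F
  induction F with
  | nil =>
    intro T hF hT
    cases T with
    | nil => simp [PySem.List.insertBy]
    | cons t T' =>
      have ht := hT t (by simp)
      simp [PySem.List.insertBy, hx, ht]
  | cons f F' ih =>
    intro T hF hT
    have hf := hF f (by simp)
    have hrec := ih T (fun y hy => hF y (by simp [hy])) hT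
    simp [PySem.List.insertBy, hx, hf, hrec]

lemma pv_foldl_insertBy_partition {α : Type} (key : α → Bool) :
    ∀ (xs F T : List α), (∀ y ∈ F, key y = false) → (∀ y ∈ T, key y = true) →
    xs.foldl (fun acc x => PySem.List.insertBy (fun a b => decide (key a < key b)) x acc) (F ++ T)
      = (F ++ xs.filter (fun x => !key x)) ++ (T ++ xs.filter key) := by
  intro xs
  induction xs with
  | nil => intro F T hF hT; simp
  | cons x xs ih =>
    intro F T hF hT
    by_cases hx : key x = true
    · have hins : PySem.List.insertBy (fun a b => decide (key a < key b)) x (F ++ T) = (F ++ T) ++ [x] := by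
        apply PySem.List.insertBy_of_forall_not_before
        intro y _
        simp [hx]
      simp only [List.foldl_cons, hins, List.append_assoc]
      rw [ih F (T ++ [x]) hF (by intro y hy; rcases List.mem_append.1 hy with h | h; exact hT y h; simp at h; simp [h, hx])]
      simp [hx, List.append_assoc]
    · have hx' : key x = false := by simpa using hx
      have hins := pv_insertBy_false key x hx' F T hF hT
      simp only [List.foldl_cons, hins]
      have : F ++ x :: T = (F ++ [x]) ++ T := by simp
      rw [this, ih (F ++ [x]) T (by intro y hy; rcases List.mem_append.1 hy with h | h; exact hF y h; simp at h; simp [h, hx']) hT]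
      simp [hx', List.append_assoc]

lemma pv_sorted_bool_partition {α : Type} (key : α → Bool) (xs : List α) :
    PySem.List.sorted xs key false = xs.filter (fun x => !key x) ++ xs.filter key := by
  rw [PySem.List.sorted_eq_foldl_insertBy]
  have h := pv_foldl_insertBy_partition key xs [] [] (by simp) (by simp)
  simpa using h

lemma pv_partition_loop {α : Type} (f : α → Bool) :
    ∀ (l : List (Int × α)) (ns sp : List Int),
    l.foldl (fun (acc : List Int × List Int) ia =>
        if f ia.2 then (acc.1, acc.2 ++ [ia.1]) else (acc.1 ++ [ia.1], acc.2)) (ns, sp)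
      = (ns ++ (l.filter (fun ia => !f ia.2)).map Prod.fst,
         sp ++ (l.filter (fun ia => f ia.2)).map Prod.fst) := by
  intro l
  induction l with
  | nil => intro ns sp; simp
  | cons ia l ih =>
    intro ns sp
    by_cases h : f ia.2 = true
    · simp [h, ih, List.append_assoc]
    · have h' : f ia.2 = false := by simpa using h
      simp [h', ih, List.append_assoc]

lemma pv_getD_lower (axes : List String) (j : Int) :
    PySem.List.pyGetD (axes.map PySem.Str.lower) j "" = PySem.Str.lower (PySem.List.pyGetD axes j "") := by
  have hempty : PySem.Str.lower "" = "" := by decide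
  rw [show ("" : String) = PySem.Str.lower "" from hempty.symm, PySem.List.pyGetD_map]
  rw [hempty]

lemma pv_order_eq (axes : List String) :
    (((PySem.List.enumerate (axes.map PySem.Str.lower) 0).foldl
        (fun (acc : List Int × List Int) ia =>
          if pvSpatialA ia.2 then (acc.1, acc.2 ++ [ia.1]) else (acc.1 ++ [ia.1], acc.2))
        ([], [])).1
      ++ ((PySem.List.enumerate (axes.map PySem.Str.lower) 0).foldl
        (fun (acc : List Int × List Int) ia =>
          if pvSpatialA ia.2 then (acc.1, acc.2 ++ [ia.1]) else (acc.1 ++ [ia.1], acc.2))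
        ([], [])).2)
      = PySem.List.sorted (PySem.List.pyRange 0 (axes.length : Int) 1) (pvKeyB axes) false := by
  rw [pv_partition_loop, pv_sorted_bool_partition]
  rw [PySem.List.enumerate_eq_map_pyRange (axes.map PySem.Str.lower) ""]
  simp only [List.filter_map, List.map_map, PySem.List.len_eq, List.length_map]
  have hkey : ∀ j : Int, pvSpatialA (PySem.List.pyGetD (axes.map PySem.Str.lower) j "") = pvKeyB axes j := by
    intro j
    simp [pvSpatialA, pvKeyB, pv_getD_lower]
  simp only [Function.comp_def, hkey]
  simp

lemma pv_pad_eq (c : List Int) (n : Nat) :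
    pvPadWhileA c n = c ++ List.replicate (n - c.length) 1 := by
  unfold pvPadWhileA
  split
  · rename_i h
    rw [pv_pad_eq (c ++ [1]) n]
    have h1 : n - c.length = (n - (c.length + 1)) + 1 := by omega
    rw [h1, List.replicate_succ]
    simp
  · rename_i h
    have h0 : n - c.length = 0 := by omega
    simp [h0]
termination_by n - c.length


-- ===== VERDICT (by name: the statement is the Claim_ definition above) =====
theorem reorder_axes_for_ome_py_spec : Claim_equal_reorder_axes_for_ome_py := by
  intro axes shape chunk_shape shard_shape _ _
  unfold Spec_reorder_axes_for_ome_py reorder_axes_for_ome_py reorder_axes_for_ome_py_alt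
  simp only [pv_order_eq axes]
  cases chunk_shape with
  | none => rfl
  | some c =>
    simp only [pv_pad_eq c axes.length]
    by_cases hc : c.isEmpty
    · simp [hc, pvTakeB]
    · simp [hc, pvTakeB]
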